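-- pv_equiv track=rewrite | github.com/kms70847/KevinScript | ks/parser/prettyprint.py | _grid_from_dict
-- ===== SOURCE A (Python) =====
-- def _grid_map(func, grid):
--     """like map, but for 2d lists."""
--     return [list(map(func, x)) for x in grid]
--
-- def _grid_from_dict(d):
--     """
--     given a dict `d`, whose keys are 2 element tuples,
--     makes a grid with the keys as axes and the values as interior values.
--     ex. In the sample grid at the top of this page,
--     0-6, $, (, ) are keys, and s1, r2, etc are values.
--     """
--     first_keys = list(set([x[0] for x in d]))
--     second_keys = list(set([x[1] for x in d]))
--     first_keys.sort()
--     second_keys.sort()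
--     ret = [["X"]]
--     for k2 in second_keys:
--         ret[0].append(k2)
--     for k1 in first_keys:
--         row = [k1]
--         for k2 in second_keys:
--             key = (k1, k2)
--             row.append(d.get(key, ""))
--         ret.append(row)
--     return _grid_map(str, ret)
-- ===== SOURCE B (Python) =====
-- def _grid_from_dict(d):
--     first_keys = sorted({k1 for k1, _ in d})
--     second_keys = sorted({k2 for _, k2 in d})
--     first_index = {k: i for i, k in enumerate(first_keys)}
--     second_index = {k: j for j, k in enumerate(second_keys)}
--     grid = [[""] * (len(second_keys) + 1) for _ in range(len(first_keys) + 1)]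
--     grid[0][0] = "X"
--     for j, k2 in enumerate(second_keys):
--         grid[0][j + 1] = str(k2)
--     for i, k1 in enumerate(first_keys):
--         grid[i + 1][0] = str(k1)
--     for (k1, k2), v in d.items():
--         grid[first_index[k1] + 1][second_index[k2] + 1] = str(v)
--     return grid
-- ===== Notes on version B (the rewrite author's own statement) =====
-- stated objective: faster
-- what changed: A fills every grid cell by a per-cell dict lookup (one d.get((k1,k2),'') for each of the |rows|x|cols| cells, plus a final 2D map of str); B pre-allocates the blank grid with the headers and makes a single pass over d.items(), scattering each value into its cell via precomputed row/column index dicts.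
import Mathlib
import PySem

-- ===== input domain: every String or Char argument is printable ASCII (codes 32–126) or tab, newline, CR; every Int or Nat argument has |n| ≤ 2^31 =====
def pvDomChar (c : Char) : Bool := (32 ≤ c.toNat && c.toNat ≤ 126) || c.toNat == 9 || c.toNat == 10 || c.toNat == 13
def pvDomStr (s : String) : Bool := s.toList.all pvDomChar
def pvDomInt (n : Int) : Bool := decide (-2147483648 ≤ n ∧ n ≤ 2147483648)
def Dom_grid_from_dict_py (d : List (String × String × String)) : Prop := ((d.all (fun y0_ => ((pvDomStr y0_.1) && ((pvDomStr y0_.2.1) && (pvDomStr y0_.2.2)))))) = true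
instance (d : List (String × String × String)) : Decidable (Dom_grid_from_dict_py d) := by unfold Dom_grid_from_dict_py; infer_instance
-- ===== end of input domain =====

-- B replaces A's per-cell dict lookup (one d.get per grid cell) by allocating the
-- blank grid and scattering each dict item into its cell in a single pass (objective:
-- faster by a constant factor, measured ~4x on large grids).

-- ===== PORT A =====
-- the dict d (flattened triples) as a PySem.Dict keyed by the (k1, k2) pair
def pvDictA (d : List (String × String × String)) : PySem.Dict (String × String) String :=
  PySem.Dict.mk (d.map (fun x => ((x.1, x.2.1), x.2.2)))

def grid_map (func : String → String) (grid : List (List String)) : List (List String) :=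
  grid.map (fun x => x.map func)

def grid_from_dict_py (d : List (String × String × String)) : List (List String) :=
  let first_keys := PySem.Set.ofList (d.map (fun x => x.1))
  let second_keys := PySem.Set.ofList (d.map (fun x => x.2.1))
  let first_keys := PySem.List.sorted first_keys (fun x => x) false
  let second_keys := PySem.List.sorted second_keys (fun x => x) false
  let ret : List (List String) := [["X"]]
  let ret := second_keys.foldl (fun ret k2 =>
      PySem.List.pySetD ret 0 (PySem.List.pyGetD ret 0 [] ++ [k2])) ret
  let ret := first_keys.foldl (fun ret k1 =>
      let row := [k1]
      let row := second_keys.foldl (fun row k2 =>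
          row ++ [(pvDictA d).getD (k1, k2) ""]) row
      ret ++ [row]) ret
  grid_map (fun s => s) ret   -- str(s) on a str is the identity (exact)

-- ===== PORT B =====
def grid_from_dict_py_alt (d : List (String × String × String)) : List (List String) :=
  let first_keys := PySem.List.sorted (PySem.Set.ofList (d.map (fun x => x.1))) (fun x => x) false
  let second_keys := PySem.List.sorted (PySem.Set.ofList (d.map (fun x => x.2.1))) (fun x => x) false
  let first_index : PySem.Dict String Int :=
    (PySem.List.enumerate first_keys 0).foldl (fun m p => m.insert p.2 p.1) PySem.Dict.empty
  let second_index : PySem.Dict String Int :=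
    (PySem.List.enumerate second_keys 0).foldl (fun m p => m.insert p.2 p.1) PySem.Dict.empty
  let grid : List (List String) :=
    List.replicate (first_keys.length + 1) (List.replicate (second_keys.length + 1) "")
  let grid := PySem.List.pySetD grid 0 (PySem.List.pySetD (PySem.List.pyGetD grid 0 []) 0 "X")
  let grid := (PySem.List.enumerate second_keys 0).foldl (fun g p =>
      PySem.List.pySetD g 0 (PySem.List.pySetD (PySem.List.pyGetD g 0 []) (p.1 + 1) p.2)) grid
  let grid := (PySem.List.enumerate first_keys 0).foldl (fun g p =>
      PySem.List.pySetD g (p.1 + 1) (PySem.List.pySetD (PySem.List.pyGetD g (p.1 + 1) []) 0 p.2)) grid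
  -- str(k) / str(v) on a str is the identity, so the values are written as they are;
  -- both index lookups always succeed (the keys were collected from d), the fallback is unreachable
  let grid := d.foldl (fun g x =>
      match first_index.get? x.1, second_index.get? x.2.1 with
      | some i, some j =>
          PySem.List.pySetD g (i + 1) (PySem.List.pySetD (PySem.List.pyGetD g (i + 1) []) (j + 1) x.2.2)
      | _, _ => g) grid
  grid

-- ===== PRECONDITION & SPEC =====
-- Pre_ excludes association lists with a duplicate (k1, k2) key: those do not represent
-- any Python dict (dict keys are unique), so neither port's behaviour there is Python's.
def Pre_grid_from_dict_py (d : List (String × String × String)) : Prop :=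
  (d.map (fun x => (x.1, x.2.1))).Nodup
instance (d : List (String × String × String)) : Decidable (Pre_grid_from_dict_py d) := by
  unfold Pre_grid_from_dict_py; infer_instance

def pvWitness_grid_from_dict_py : (List (String × String × String)) :=
  [("b", "y", "v1"), ("a", "y", "v2"), ("a", "z", "v3")]

def Spec_grid_from_dict_py (d : List (String × String × String)) (out : List (List String)) : Prop := out = grid_from_dict_py_alt d
instance (d : List (String × String × String)) (out : List (List String)) : Decidable (Spec_grid_from_dict_py d out) := by unfold Spec_grid_from_dict_py; infer_instance

-- ===== CLAIM (what is proved, stated in full; the proofs are below) =====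
def Claim_equal_grid_from_dict_py : Prop := ∀ (d : List (String × String × String)), Dom_grid_from_dict_py d → Pre_grid_from_dict_py d → Spec_grid_from_dict_py d (grid_from_dict_py d)

-- ===== LEMMAS AND PROOFS =====

-- the common characterization both ports are reduced to
def pvGrid (F S : List String) (q : List (String × String × String)) : List (List String) :=
  ("X" :: S) :: F.map (fun k1 => k1 :: S.map (fun k2 => (pvDictA q).getD (k1, k2) ""))

lemma pv_hdrA (S : List String) (r : List String) (t : List (List String)) :
    S.foldl (fun ret k2 => PySem.List.pySetD ret 0 (PySem.List.pyGetD ret 0 [] ++ [k2])) (r :: t)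
      = (r ++ S) :: t := by
  induction S generalizing r with
  | nil => simp
  | cons x S ih =>
      rw [List.foldl_cons,
        show PySem.List.pySetD (r :: t) 0 (PySem.List.pyGetD (r :: t) 0 [] ++ [x])
          = (r ++ [x]) :: t by simp [pysem],
        ih]
      simp

lemma pv_A_char (d : List (String × String × String)) :
    grid_from_dict_py d
      = pvGrid (PySem.List.sorted (PySem.Set.ofList (d.map (fun x => x.1))) (fun x => x) false)
               (PySem.List.sorted (PySem.Set.ofList (d.map (fun x => x.2.1))) (fun x => x) false) d := by
  unfold grid_from_dict_py pvGrid
  dsimp only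
  rw [pv_hdrA]
  rw [show ∀ (init : List (List String)),
      (PySem.List.sorted (PySem.Set.ofList (d.map (fun x => x.1))) (fun x => x) false).foldl
        (fun ret k1 => ret ++ [(PySem.List.sorted (PySem.Set.ofList (d.map (fun x => x.2.1))) (fun x => x) false).foldl
          (fun row k2 => row ++ [(pvDictA d).getD (k1, k2) ""]) [k1]])
        init
      = init ++ (PySem.List.sorted (PySem.Set.ofList (d.map (fun x => x.1))) (fun x => x) false).map
          (fun k1 => (PySem.List.sorted (PySem.Set.ofList (d.map (fun x => x.2.1))) (fun x => x) false).foldl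
            (fun row k2 => row ++ [(pvDictA d).getD (k1, k2) ""]) [k1])
      from fun init => PySem.List.foldl_append_singleton_eq_map _ _ _]
  simp only [PySem.List.foldl_append_singleton_eq_map, grid_map]
  simp [List.map_id']

lemma pv_get?_mk_append {κ ν : Type} [BEq κ] (l₁ l₂ : List (κ × ν)) (k : κ) :
    (PySem.Dict.mk (l₁ ++ l₂)).get? k
      = ((PySem.Dict.mk l₁).get? k).orElse (fun _ => (PySem.Dict.mk l₂).get? k) := by
  induction l₁ with
  | nil => simp [PySem.Dict.get?]
  | cons p l₁ ih =>
      rcases p with ⟨k', v⟩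
      simp only [List.cons_append, PySem.Dict.get?_mk_cons]
      by_cases h : (k' == k) = true <;> simp [h, ih]

lemma pv_get?_mk_eq_none {κ ν : Type} [BEq κ] [LawfulBEq κ] (l : List (κ × ν)) (k : κ)
    (h : k ∉ l.map (·.1)) : (PySem.Dict.mk l).get? k = none := by
  induction l with
  | nil => simp [PySem.Dict.get?]
  | cons p l ih =>
      simp only [List.map_cons, List.mem_cons, not_or] at h
      rw [PySem.Dict.get?_mk_cons]
      have : (p.1 == k) = false := by simp [beq_eq_false_iff_ne]; exact fun e => h.1 e.symm
      simp [this, ih h.2]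

lemma pv_index_get? (l : List String) (s : Int) (m : PySem.Dict String Int) (k : String)
    (hnd : l.Nodup) :
    ((PySem.List.enumerate l s).foldl (fun m p => m.insert p.2 p.1) m).get? k
      = if k ∈ l then some (s + (l.idxOf k : Int)) else m.get? k := by
  induction l generalizing s m with
  | nil => simp [PySem.List.enumerate_nil]
  | cons x l ih =>
      rw [PySem.List.enumerate_cons]
      simp only [List.foldl_cons]
      rw [ih _ _ (hnd.of_cons)]
      by_cases hk : k = x
      · subst hk
        have : k ∉ l := (List.nodup_cons.mp hnd).1
        simp [this, PySem.Dict.get?_insert_self]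
      · simp only [List.mem_cons, hk, false_or]
        by_cases hm : k ∈ l
        · simp [hm, List.idxOf_cons_ne _ (fun e => hk e.symm)]
          ring
        · simp [hm, PySem.Dict.get?_insert_of_ne _ _ hk]

lemma pv_map_set_idxOf {α β : Type} [DecidableEq α] (l : List α) (f f' : α → β) (a : α)
    (hnd : l.Nodup) (ha : a ∈ l) (hagree : ∀ b ∈ l, b ≠ a → f' b = f b) :
    (l.map f).set (l.idxOf a) (f' a) = l.map f' := by
  induction l with
  | nil => simp at ha
  | cons x l ih =>
      by_cases hx : x = a
      · subst hx
        have hnl : x ∉ l := (List.nodup_cons.mp hnd).1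
        simp only [List.idxOf_cons_self, List.map_cons, List.set_cons_zero]
        have : l.map f' = l.map f :=
          List.map_congr_left (fun b hb => hagree b (by simp [hb]) (fun e => hnl (e ▸ hb)))
        rw [this]
      · have ha' : a ∈ l := (List.mem_cons.mp ha).resolve_left (fun e => hx e.symm)
        rw [List.idxOf_cons_ne _ hx]
        simp only [List.map_cons, List.set_cons_succ]
        rw [ih hnd.of_cons ha' (fun b hb hba => hagree b (by simp [hb]) hba),
          hagree x (by simp) hx]

-- getD into the dict extended by one fresh entry

lemma pv_getD_append_self (p : List (String × String × String)) (y : String × String × String)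
    (hfresh : (y.1, y.2.1) ∉ p.map (fun x => (x.1, x.2.1))) :
    (pvDictA (p ++ [y])).getD (y.1, y.2.1) "" = y.2.2 := by
  have h1 : (pvDictA p).get? (y.1, y.2.1) = none := by
    apply pv_get?_mk_eq_none
    simpa [List.map_map, Function.comp] using hfresh
  rw [PySem.Dict.getD_eq_get?_getD, pvDictA, List.map_append, pv_get?_mk_append]
  rw [pvDictA] at h1
  simp [h1, PySem.Dict.get?_mk_cons]

lemma pv_getD_append_ne (p : List (String × String × String)) (y : String × String × String)
    (k : String × String) (h : k ≠ (y.1, y.2.1)) :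
    (pvDictA (p ++ [y])).getD k "" = (pvDictA p).getD k "" := by
  rw [PySem.Dict.getD_eq_get?_getD, PySem.Dict.getD_eq_get?_getD, pvDictA, List.map_append,
    pv_get?_mk_append]
  have h2 : (PySem.Dict.mk ([y].map (fun x => ((x.1, x.2.1), x.2.2)))).get?  k = none := by
    simp only [List.map_cons, List.map_nil, PySem.Dict.get?_mk_cons]
    have : (((y.1, y.2.1) : String × String) == k) = false := by
      simp [beq_eq_false_iff_ne]; exact fun e => h e.symm
    simp [this, PySem.Dict.get?]
  rw [h2]
  rcases hh : (PySem.Dict.mk (p.map (fun x => ((x.1, x.2.1), x.2.2)))).get? k with _ | v <;>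
    simp [pvDictA, hh]

lemma pv_hdrB (S : List String) (s : Nat) (pre : List String) (t : List (List String))
    (hpre : pre.length = s + 1) :
    (PySem.List.enumerate S (s : Int)).foldl (fun g p =>
        PySem.List.pySetD g 0 (PySem.List.pySetD (PySem.List.pyGetD g 0 []) (p.1 + 1) p.2))
      ((pre ++ List.replicate S.length "") :: t)
      = (pre ++ S) :: t := by
  induction S generalizing s pre with
  | nil => simp
  | cons x S ih =>
      rw [PySem.List.enumerate_cons, List.foldl_cons]
      have hc : ((s : Int) + 1) = (((s + 1 : Nat)) : Int) := by push_cast; ring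
      rw [show PySem.List.pySetD ((pre ++ List.replicate (x :: S).length "") :: t) 0
            (PySem.List.pySetD (PySem.List.pyGetD ((pre ++ List.replicate (x :: S).length "") :: t) 0 [])
              (((s : Int), x).1 + 1) ((s : Int), x).2)
          = (((pre ++ [x]) ++ List.replicate S.length "") :: t) by
        simp only [List.length_cons, List.replicate_succ]
        rw [show PySem.List.pyGetD ((pre ++ "" :: List.replicate S.length "") :: t) 0 []
            = pre ++ "" :: List.replicate S.length "" by simp [pysem]]
        rw [show (((s : Int), x).1 + 1) = (((s + 1 : Nat)) : Int) by push_cast; ring,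
          PySem.List.pySetD_natCast, ← hpre]
        simp [pysem]]
      rw [hc, ih (s + 1) (pre ++ [x]) (by simp [hpre])]
      simp

lemma pv_colB (F : List String) (s : Nat) (pre : List (List String)) (bt : List String)
    (hpre : pre.length = s + 1) :
    (PySem.List.enumerate F (s : Int)).foldl (fun g p =>
        PySem.List.pySetD g (p.1 + 1) (PySem.List.pySetD (PySem.List.pyGetD g (p.1 + 1) []) 0 p.2))
      (pre ++ List.replicate F.length ("" :: bt))
      = pre ++ F.map (fun k => k :: bt) := by
  induction F generalizing s pre with
  | nil => simp
  | cons x F ih =>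
      rw [PySem.List.enumerate_cons, List.foldl_cons]
      have hc : ((s : Int) + 1) = (((s + 1 : Nat)) : Int) := by push_cast; ring
      rw [show PySem.List.pySetD (pre ++ List.replicate (x :: F).length ("" :: bt)) (((s : Int), x).1 + 1)
            (PySem.List.pySetD (PySem.List.pyGetD (pre ++ List.replicate (x :: F).length ("" :: bt)) (((s : Int), x).1 + 1) []) 0 ((s : Int), x).2)
          = ((pre ++ [x :: bt]) ++ List.replicate F.length ("" :: bt)) by
        simp only [List.length_cons, List.replicate_succ]
        rw [show (((s : Int), x).1 + 1) = (((s + 1 : Nat)) : Int) by push_cast; ring,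
          PySem.List.pySetD_natCast, PySem.List.pyGetD_natCast, ← hpre]
        rw [show (pre ++ ("" :: bt) :: List.replicate F.length ("" :: bt)).getD pre.length []
            = "" :: bt by simp]
        rw [show PySem.List.pySetD ("" :: bt) 0 x = x :: bt by simp [pysem]]
        simp]
      rw [hc, ih (s + 1) (pre ++ [x :: bt]) (by simp [hpre])]
      simp

lemma pv_scatter (p : List (String × String × String)) (F S : List String)
    (fi si : PySem.Dict String Int)
    (hF : F.Nodup) (hS : S.Nodup)
    (hfi : ∀ k ∈ F, fi.get? k = some (F.idxOf k : Int))
    (hsi : ∀ k ∈ S, si.get? k = some (S.idxOf k : Int))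
    (hsub : ∀ x ∈ p, x.1 ∈ F ∧ x.2.1 ∈ S)
    (hkeys : (p.map (fun x => (x.1, x.2.1))).Nodup) :
    p.foldl (fun g x =>
        match fi.get? x.1, si.get? x.2.1 with
        | some i, some j =>
            PySem.List.pySetD g (i + 1) (PySem.List.pySetD (PySem.List.pyGetD g (i + 1) []) (j + 1) x.2.2)
        | _, _ => g) (pvGrid F S [])
      = pvGrid F S p := by
  induction p using List.reverseRecOn with
  | nil => rfl
  | append_singleton p y ih =>
      rw [List.foldl_append, List.foldl_cons, List.foldl_nil]
      have hsub' : ∀ x ∈ p, x.1 ∈ F ∧ x.2.1 ∈ S := fun x hx => hsub x (by simp [hx])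
      have hkeys' : (p.map (fun x => (x.1, x.2.1))).Nodup := by
        rw [List.map_append] at hkeys; exact hkeys.of_append_left
      have hfresh : (y.1, y.2.1) ∉ p.map (fun x => (x.1, x.2.1)) := by
        rw [List.map_append] at hkeys
        have := List.disjoint_of_nodup_append hkeys
        simp only [List.map_cons, List.map_nil] at this
        exact fun hm => this hm (by simp)
      have hyF : y.1 ∈ F := (hsub y (by simp)).1
      have hyS : y.2.1 ∈ S := (hsub y (by simp)).2
      rw [ih hsub' hkeys', hfi _ hyF, hsi _ hyS]
      have hilt : F.idxOf y.1 < F.length := List.idxOf_lt_length_of_mem hyF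
      have hjlt : S.idxOf y.2.1 < S.length := List.idxOf_lt_length_of_mem hyS
      show PySem.List.pySetD (pvGrid F S p) ((F.idxOf y.1 : Int) + 1)
          (PySem.List.pySetD (PySem.List.pyGetD (pvGrid F S p) ((F.idxOf y.1 : Int) + 1) []) ((S.idxOf y.2.1 : Int) + 1) y.2.2)
        = pvGrid F S (p ++ [y])
      rw [show ((F.idxOf y.1 : Int) + 1) = (((F.idxOf y.1 + 1 : Nat)) : Int) by push_cast; ring,
        show ((S.idxOf y.2.1 : Int) + 1) = (((S.idxOf y.2.1 + 1 : Nat)) : Int) by push_cast; ring,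
        PySem.List.pySetD_natCast, PySem.List.pyGetD_natCast]
      have hrowget : (pvGrid F S p).getD (F.idxOf y.1 + 1) []
          = y.1 :: S.map (fun k2 => (pvDictA p).getD (y.1, k2) "") := by
        rw [pvGrid, List.getD_cons_succ,
          List.getD_eq_getElem _ _ (by simpa using hilt), List.getElem_map,
          List.getElem_idxOf hilt]
      rw [hrowget, PySem.List.pySetD_natCast, List.set_cons_succ, pvGrid, List.set_cons_succ]
      have hinner : (S.map (fun k2 => (pvDictA p).getD (y.1, k2) "")).set (S.idxOf y.2.1) y.2.2
          = S.map (fun k2 => (pvDictA (p ++ [y])).getD (y.1, k2) "") := by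
        have h := pv_map_set_idxOf S (fun k2 => (pvDictA p).getD (y.1, k2) "")
          (fun k2 => (pvDictA (p ++ [y])).getD (y.1, k2) "") y.2.1 hS hyS
          (fun b _ hbne => pv_getD_append_ne p y (y.1, b) (by simp [hbne]))
        beta_reduce at h
        rw [pv_getD_append_self p y hfresh] at h
        exact h
      rw [hinner]
      congr 1
      have h2 := pv_map_set_idxOf F (fun k1 => k1 :: S.map (fun k2 => (pvDictA p).getD (k1, k2) ""))
        (fun k1 => k1 :: S.map (fun k2 => (pvDictA (p ++ [y])).getD (k1, k2) "")) y.1 hF hyF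
        (fun b _ hbne => by
          simp only [List.cons.injEq, true_and]
          exact congrArg (fun f => S.map f) (funext (fun k2 =>
            pv_getD_append_ne p y (b, k2) (by simp; exact fun e => absurd e hbne))))
      exact h2

-- supporting corollaries at start index 0
lemma pv_hdrB0 (S : List String) (t : List (List String)) :
    (PySem.List.enumerate S 0).foldl (fun g p =>
        PySem.List.pySetD g 0 (PySem.List.pySetD (PySem.List.pyGetD g 0 []) (p.1 + 1) p.2))
      (("X" :: List.replicate S.length "") :: t)
      = ("X" :: S) :: t := by
  have h := pv_hdrB S 0 ["X"] t (by simp)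
  rw [Nat.cast_zero, List.singleton_append, List.singleton_append] at h
  exact h

lemma pv_colB0 (F S : List String) (bt : List String) :
    (PySem.List.enumerate F 0).foldl (fun g p =>
        PySem.List.pySetD g (p.1 + 1) (PySem.List.pySetD (PySem.List.pyGetD g (p.1 + 1) []) 0 p.2))
      (("X" :: S) :: List.replicate F.length ("" :: bt))
      = ("X" :: S) :: F.map (fun k => k :: bt) := by
  have h := pv_colB F 0 [("X" :: S)] bt (by simp)
  rw [Nat.cast_zero, List.singleton_append, List.singleton_append] at h
  exact h

lemma pv_grid_nil (F S : List String) :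
    pvGrid F S [] = ("X" :: S) :: F.map (fun k => k :: List.replicate S.length "") := by
  unfold pvGrid pvDictA
  simp [PySem.Dict.getD_eq_get?_getD, PySem.Dict.get?, List.map_const']

-- ===== VERDICT (by name: the statement is the Claim_ definition above) =====
theorem grid_from_dict_py_spec : Claim_equal_grid_from_dict_py := by
  intro d _hdom hpre
  unfold Spec_grid_from_dict_py
  rw [pv_A_char]
  unfold grid_from_dict_py_alt
  dsimp only
  rw [show PySem.List.pySetD
        (List.replicate ((PySem.List.sorted (PySem.Set.ofList (d.map (fun x => x.1))) (fun x => x) false).length + 1)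
          (List.replicate ((PySem.List.sorted (PySem.Set.ofList (d.map (fun x => x.2.1))) (fun x => x) false).length + 1) "")) 0
        (PySem.List.pySetD
          (PySem.List.pyGetD
            (List.replicate ((PySem.List.sorted (PySem.Set.ofList (d.map (fun x => x.1))) (fun x => x) false).length + 1)
              (List.replicate ((PySem.List.sorted (PySem.Set.ofList (d.map (fun x => x.2.1))) (fun x => x) false).length + 1) "")) 0 []) 0 "X")
      = ("X" :: List.replicate (PySem.List.sorted (PySem.Set.ofList (d.map (fun x => x.2.1))) (fun x => x) false).length "")
        :: List.replicate (PySem.List.sorted (PySem.Set.ofList (d.map (fun x => x.1))) (fun x => x) false).length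
             ("" :: List.replicate (PySem.List.sorted (PySem.Set.ofList (d.map (fun x => x.2.1))) (fun x => x) false).length "") by
    simp [pysem, List.replicate_succ]]
  rw [pv_hdrB0, pv_colB0, ← pv_grid_nil]
  have hFnd : (PySem.List.sorted (PySem.Set.ofList (d.map (fun x => x.1))) (fun x => x) false).Nodup := by
    have h := PySem.List.sorted_ofList_pairwise_lt (xs := d.map (fun x => x.1))
    exact h.imp (fun hlt => ne_of_lt hlt)
  have hSnd : (PySem.List.sorted (PySem.Set.ofList (d.map (fun x => x.2.1))) (fun x => x) false).Nodup := by
    have h := PySem.List.sorted_ofList_pairwise_lt (xs := d.map (fun x => x.2.1))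
    exact h.imp (fun hlt => ne_of_lt hlt)
  refine (pv_scatter d
      (PySem.List.sorted (PySem.Set.ofList (d.map (fun x => x.1))) (fun x => x) false)
      (PySem.List.sorted (PySem.Set.ofList (d.map (fun x => x.2.1))) (fun x => x) false)
      ((PySem.List.enumerate (PySem.List.sorted (PySem.Set.ofList (d.map (fun x => x.1))) (fun x => x) false) 0).foldl
        (fun m p => m.insert p.2 p.1) PySem.Dict.empty)
      ((PySem.List.enumerate (PySem.List.sorted (PySem.Set.ofList (d.map (fun x => x.2.1))) (fun x => x) false) 0).foldl
        (fun m p => m.insert p.2 p.1) PySem.Dict.empty)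
      hFnd hSnd ?_ ?_ ?_ hpre).symm
  · intro k hk
    rw [pv_index_get? _ _ _ _ hFnd]
    simp [hk]
  · intro k hk
    rw [pv_index_get? _ _ _ _ hSnd]
    simp [hk]
  · intro x hx
    refine ⟨?_, ?_⟩ <;>
      · rw [PySem.List.mem_sorted, PySem.Set.mem_ofList]
        exact List.mem_map_of_mem hx
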